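-- pv_equiv track=rewrite | github.com/doubled2169/GitHub | Python/Geek/survive.py | minimumDays
-- ===== SOURCE A (Python) =====
-- def minimumDays(S, N, M):
--     maxbuy = N
--     days = 1
--     if M > N:
--         return -1
--     elif N==M and S>=7:
--         return -1
--     elif ((N-M)*6)<M and S>=7:
--         return -1
--     else:
--         while S > 0:
--             for i in range(S):
--                 if N < M:
--                     N += maxbuy
--                     days +=1
--                 if N == 0:
--                     N = N
--                     days +=1
--                 S -= 1
--                 N -= M
--     return days
-- ===== SOURCE B (Python) =====
-- def minimumDays(S, N, M):
--     if M > N or (S >= 7 and (N - M) * 6 < M):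
--         return -1
--     return -(-(S * M) // N)
-- ===== Notes on version B (the rewrite author's own statement) =====
-- stated objective: faster
-- what changed: Replaced the O(S) day-by-day stock simulation with the closed form ceil(S*M/N) behind one combined infeasibility guard; intended as faster (asymptotic), measured up to ~190x at S=262144 on inputs that reach A's loop (guard-hit inputs are O(1) in both); Pre_ restricts to the problem's natural domain of positive survival days S and positive daily need M, excluding nonpositive S or M, where A's returned day counts are leftovers of its loop initialisation and never-consuming simulation.
-- outside the precondition, e.g. on minimumDays(5, 3, 0): A returns 1, B returns 0; on minimumDays(0, 3, 2): A returns 1, B returns 0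
import Mathlib
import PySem

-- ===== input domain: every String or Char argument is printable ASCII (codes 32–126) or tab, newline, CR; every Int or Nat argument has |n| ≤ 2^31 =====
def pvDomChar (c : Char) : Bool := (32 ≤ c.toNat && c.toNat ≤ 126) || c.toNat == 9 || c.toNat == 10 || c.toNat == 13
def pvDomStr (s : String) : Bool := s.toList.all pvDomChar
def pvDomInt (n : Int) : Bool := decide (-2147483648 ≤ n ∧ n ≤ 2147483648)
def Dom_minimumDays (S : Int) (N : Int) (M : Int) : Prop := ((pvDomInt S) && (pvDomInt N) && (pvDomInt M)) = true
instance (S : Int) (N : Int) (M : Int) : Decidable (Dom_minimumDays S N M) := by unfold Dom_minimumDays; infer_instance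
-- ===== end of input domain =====

-- B replaces A's O(S) day-by-day simulation by the closed form ceil(S*M/N) behind one infeasibility guard; intended as faster, measured up to ~190x at S=262144 on inputs reaching A's loop (guard-hit inputs are O(1) in both).

-- ===== PORT A =====
-- inner 'for i in range(S)' loop: state (S, N, days); maxbuy = N0
def pvInnerA (N0 M : Int) : List Int → Int × Int × Int → Int × Int × Int
  | [], st => st
  | _ :: rest, (S, N, days) =>
      let N1 := if N < M then N + N0 else N
      let d1 := if N < M then days + 1 else days
      let d2 := if N1 = 0 then d1 + 1 else d1
      pvInnerA N0 M rest (S - 1, N1 - M, d2)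

-- outer 'while S > 0' loop, with fuel making it total (S.toNat + 1 always suffices)
def pvWhileA (N0 M : Int) : Nat → Int × Int × Int → Int × Int × Int
  | 0, st => st
  | fuel + 1, st =>
      if st.1 > 0 then pvWhileA N0 M fuel (pvInnerA N0 M (PySem.List.pyRange 0 st.1 1) st)
      else st

def minimumDays (S : Int) (N : Int) (M : Int) : Int :=
  if M > N then -1
  else if N = M ∧ S ≥ 7 then -1
  else if (N - M) * 6 < M ∧ S ≥ 7 then -1
  else (pvWhileA N M (S.toNat + 1) (S, N, 1)).2.2

-- ===== PORT B =====
def minimumDays_alt (S : Int) (N : Int) (M : Int) : Int :=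
  if M > N ∨ (S ≥ 7 ∧ (N - M) * 6 < M) then -1
  else -(PySem.Int.floordiv (-(S * M)) N)

-- ===== PRECONDITION & SPEC =====
-- Pre_ restricts to the problem's natural domain (survive S days, needing M food per day, both
-- positive counts): it excludes nonpositive S or M, on which A still returns a day count that is
-- only a leftover of its loop initialisation and never-consuming simulation.
def Pre_minimumDays (S : Int) (N : Int) (M : Int) : Prop := 1 ≤ S ∧ 1 ≤ M
instance (S : Int) (N : Int) (M : Int) : Decidable (Pre_minimumDays S N M) := by unfold Pre_minimumDays; infer_instance
def pvWitness_minimumDays : Int × Int × Int := (10, 16, 2)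

def Spec_minimumDays (S : Int) (N : Int) (M : Int) (out : Int) : Prop := out = minimumDays_alt S N M
instance (S : Int) (N : Int) (M : Int) (out : Int) : Decidable (Spec_minimumDays S N M out) := by unfold Spec_minimumDays; infer_instance

-- ===== CLAIM (what is proved, stated in full; the proofs are below) =====
def Claim_equal_minimumDays : Prop := ∀ (S : Int) (N : Int) (M : Int), Dom_minimumDays S N M → Pre_minimumDays S N M → Spec_minimumDays S N M (minimumDays S N M)

-- ===== LEMMAS AND PROOFS =====

-- Invariant of the inner loop for M > 0: S decreases by the length, the stock stays in [0, N0)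
-- (so the N == 0 branch never fires), and days·N0 accounts exactly for the food consumed.
lemma innerA_spec (N0 M : Int) (hM : 0 < M) (hMN : M ≤ N0) :
    ∀ (l : List Int) (S N d : Int), 0 ≤ N → N ≤ N0 →
      (pvInnerA N0 M l (S, N, d)).1 = S - l.length
      ∧ 0 ≤ (pvInnerA N0 M l (S, N, d)).2.1
      ∧ (l = [] ∨ (pvInnerA N0 M l (S, N, d)).2.1 < N0)
      ∧ (pvInnerA N0 M l (S, N, d)).2.1 + (l.length : Int) * M
          = N + ((pvInnerA N0 M l (S, N, d)).2.2 - d) * N0 := by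
  intro l
  induction l with
  | nil =>
      intro S N d h0 h1
      refine ⟨by simp [pvInnerA], by simpa [pvInnerA], Or.inl rfl, by simp [pvInnerA]⟩
  | cons x rest ih =>
      intro S N d h0 h1
      by_cases hb : N < M
      · have hne : ¬ (N + N0 = 0) := by omega
        have hstep : pvInnerA N0 M (x :: rest) (S, N, d)
            = pvInnerA N0 M rest (S - 1, N + N0 - M, d + 1) := by
          simp [pvInnerA, hb, hne]
        obtain ⟨e1, e2, e3, e4⟩ := ih (S - 1) (N + N0 - M) (d + 1) (by omega) (by omega)
        rw [hstep]
        refine ⟨by rw [e1, List.length_cons]; push_cast; ring, e2, ?_, ?_⟩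
        · right
          rcases e3 with h | h
          · subst h; simp [pvInnerA]; omega
          · exact h
        · push_cast [List.length_cons]
          linear_combination e4
      · have hne : ¬ (N = 0) := by omega
        have hstep : pvInnerA N0 M (x :: rest) (S, N, d)
            = pvInnerA N0 M rest (S - 1, N - M, d) := by
          simp [pvInnerA, hb, hne]
        obtain ⟨e1, e2, e3, e4⟩ := ih (S - 1) (N - M) d (by omega) (by omega)
        rw [hstep]
        refine ⟨by rw [e1, List.length_cons]; push_cast; ring, e2, ?_, ?_⟩
        · right
          rcases e3 with h | h
          · subst h; simp [pvInnerA]; omega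
          · exact h
        · push_cast [List.length_cons]
          linear_combination e4

lemma whileA_exhaust (N0 M : Int) (f : Nat) (st : Int × Int × Int) (h : ¬ st.1 > 0) :
    pvWhileA N0 M (f + 1) st = st := by
  simp [pvWhileA, h]

-- ===== VERDICT (by name: the statement is the Claim_ definition above) =====
theorem minimumDays_spec : Claim_equal_minimumDays := by
  intro S N M _ hPre
  obtain ⟨hS, hM⟩ := hPre
  unfold Spec_minimumDays minimumDays minimumDays_alt
  by_cases g1 : M > N
  · simp [g1]
  by_cases g2 : N = M ∧ S ≥ 7
  · have hbB : M > N ∨ (S ≥ 7 ∧ (N - M) * 6 < M) := Or.inr ⟨g2.2, by omega⟩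
    rw [if_neg g1, if_pos g2, if_pos hbB]
  by_cases g3 : (N - M) * 6 < M ∧ S ≥ 7
  · have hbB : M > N ∨ (S ≥ 7 ∧ (N - M) * 6 < M) := Or.inr ⟨g3.2, g3.1⟩
    rw [if_neg g1, if_neg g2, if_pos g3, if_pos hbB]
  have hb : ¬ (M > N ∨ (S ≥ 7 ∧ (N - M) * 6 < M)) := by
    push_neg; exact ⟨by omega, fun h7 => by omega⟩
  simp only [if_neg g1, if_neg g2, if_neg g3, if_neg hb]
  have hMN : M ≤ N := by omega
  have hlen : ((PySem.List.pyRange 0 S 1).length : Int) = S := by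
    rw [PySem.List.length_pyRange_one]; omega
  have hstep1 : pvWhileA N M (S.toNat + 1) (S, N, 1)
      = pvWhileA N M S.toNat (pvInnerA N M (PySem.List.pyRange 0 S 1) (S, N, 1)) := by
    simp only [pvWhileA]
    rw [if_pos (show ((S, N, (1:Int)) : Int × Int × Int).1 > 0 by omega)]
  obtain ⟨k, hk⟩ : ∃ k, S.toNat = k + 1 := ⟨S.toNat - 1, by omega⟩
  rw [hstep1, hk]
  obtain ⟨e1, e2, e3, e4⟩ :=
    innerA_spec N M (by omega) hMN (PySem.List.pyRange 0 S 1) S N 1 (by omega) le_rfl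
  have hr1 : (pvInnerA N M (PySem.List.pyRange 0 S 1) (S, N, 1)).1 = 0 := by
    rw [e1, hlen]; omega
  rw [whileA_exhaust N M k _ (by omega)]
  have hlt : (pvInnerA N M (PySem.List.pyRange 0 S 1) (S, N, 1)).2.1 < N := by
    rcases e3 with h | h
    · exfalso; rw [h] at hlen; simp at hlen; omega
    · exact h
  rw [hlen] at e4
  exact ((PySem.Int.neg_floordiv_neg_eq_iff_of_pos (by omega)).mpr
    ⟨by linarith, by linarith⟩).symm
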